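-- pv_equiv track=rewrite | github.com/alexrysin/alex-rysin-website | scripts/show-fb-blocks.py | strip_md
-- ===== SOURCE A (Python) =====
-- def strip_md(t):
--     lines = t.split("\n"); out = []; skip = True
--     for ln in lines:
--         s = ln.strip()
--         if skip and (s.startswith("You tagged") or s.startswith("You were")
--                      or s.startswith("Updated ") or s.startswith("Click for")
--                      or s.startswith("http") or s.startswith("Place:")
--                      or s.startswith("Address:") or s.startswith("From ")
--                      or not s):
--             continue
--         skip = False
--         out.append(ln)
--     return "\n".join(out).strip()
-- ===== SOURCE B (Python) =====
-- PREFIXES = ("You tagged", "You were", "Updated ", "Click for",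
--             "http", "Place:", "Address:", "From ")
--
-- def _is_meta(ln):
--     s = ln.strip()
--     return s.startswith(PREFIXES) or not s
--
-- def strip_md(t):
--     # Work on the raw string: peel metadata lines off the front, never
--     # building a list of lines or joining anything back together.
--     while True:
--         i = t.find("\n")
--         if i < 0:
--             return "" if _is_meta(t) else t.strip()
--         if not _is_meta(t[:i]):
--             return t.strip()
--         t = t[i + 1:]
-- ===== Notes on version B (the rewrite author's own statement) =====
-- stated objective: alternative
-- what changed: B never materializes a list of lines: it works on the raw string, repeatedly locating the first newline with find and cutting the metadata head line off the front, then returns the stripped remaining suffix directly instead of re-joining collected lines.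
import Mathlib
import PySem

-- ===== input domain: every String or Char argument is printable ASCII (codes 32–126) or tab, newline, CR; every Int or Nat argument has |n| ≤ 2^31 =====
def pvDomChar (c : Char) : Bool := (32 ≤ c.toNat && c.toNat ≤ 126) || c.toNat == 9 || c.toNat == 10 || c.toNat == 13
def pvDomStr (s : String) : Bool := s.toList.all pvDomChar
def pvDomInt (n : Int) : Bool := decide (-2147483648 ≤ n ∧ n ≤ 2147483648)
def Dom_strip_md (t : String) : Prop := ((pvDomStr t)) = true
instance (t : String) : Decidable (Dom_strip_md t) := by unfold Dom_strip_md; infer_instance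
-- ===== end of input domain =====

-- B avoids A's split/collect/join pipeline: it works on the raw character string,
-- repeatedly cutting the leading metadata line off the front (alternative; same cost).

-- ===== PORT A =====
-- the loop body of A: state = (skip, out)
def stripAStep (st : Bool × List String) (ln : String) : Bool × List String :=
  let s := PySem.Str.strip ln
  if st.1 && (PySem.Str.startswith s "You tagged" || PySem.Str.startswith s "You were"
      || PySem.Str.startswith s "Updated " || PySem.Str.startswith s "Click for"
      || PySem.Str.startswith s "http" || PySem.Str.startswith s "Place:"
      || PySem.Str.startswith s "Address:" || PySem.Str.startswith s "From "
      || (PySem.Str.len s == 0)) then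
    st
  else
    (false, st.2 ++ [ln])

-- sep "\n" ≠ "", so split? is always some; .getD [] only unwraps
def strip_md (t : String) : String :=
  let lines := (PySem.Str.split? t "\n").getD []
  let r := lines.foldl stripAStep (true, [])
  PySem.Str.strip (PySem.Str.join "\n" r.2)

-- ===== PORT B =====
-- _is_meta(ln) from Source B ('or not s' = the stripped line is empty)
def isMetaAlt (ln : List Char) : Bool :=
  let s := PySem.Chars.strip ln
  PySem.Chars.startswith s "You tagged".toList || PySem.Chars.startswith s "You were".toList
    || PySem.Chars.startswith s "Updated ".toList || PySem.Chars.startswith s "Click for".toList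
    || PySem.Chars.startswith s "http".toList || PySem.Chars.startswith s "Place:".toList
    || PySem.Chars.startswith s "Address:".toList || PySem.Chars.startswith s "From ".toList
    || s.isEmpty

-- the while-loop of Source B: i = t.find("\n"); cut t[:i] off while it is metadata
def stripLoop (cs : List Char) : List Char :=
  let i := PySem.Chars.find cs ['\n']
  if h : i < 0 then
    if isMetaAlt cs then [] else PySem.Chars.strip cs
  else if !isMetaAlt (PySem.Chars.slice cs none (some i)) then
    PySem.Chars.strip cs
  else
    stripLoop (PySem.Chars.slice cs (some (i + 1)) none)
termination_by cs.length
decreasing_by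
  have h0 : 0 ≤ PySem.Chars.find cs ['\n'] := by omega
  have hin := (PySem.Chars.find_nonneg_iff cs ['\n']).mp h0
  have hne : cs ≠ [] := by rintro rfl; simp at hin
  have hlen : 0 < cs.length := List.length_pos_iff.mpr hne
  simp only [PySem.Chars.slice_eq_listSlice,
    PySem.List.slice_from (xs := cs) (a := PySem.Chars.find cs ['\n'] + 1) (by omega),
    List.length_drop]
  omega

def strip_md_alt (t : String) : String := String.ofList (stripLoop t.toList)

-- ===== PRECONDITION & SPEC =====
def Spec_strip_md (t : String) (out : String) : Prop := out = strip_md_alt t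
instance (t : String) (out : String) : Decidable (Spec_strip_md t out) := by unfold Spec_strip_md; infer_instance

-- ===== CLAIM (what is proved, stated in full; the proofs are below) =====
def Claim_equal_strip_md : Prop := ∀ (t : String), Dom_strip_md t → Spec_strip_md t (strip_md t)

-- ===== LEMMAS AND PROOFS =====

-- structural reference splitter: splC cs = cs.split('\n') as a plain recursion
def splC : List Char → List (List Char)
  | [] => [[]]
  | c :: rest => if c = '\n' then [] :: splC rest else (splC rest).modifyHead (c :: ·)

-- leading-metadata dropper, the common characterization of both loops
def dropMetaC : List (List Char) → List (List Char)
  | [] => []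
  | l :: ls => if isMetaAlt l then dropMetaC ls else l :: ls

def dropMetaS : List String → List String
  | [] => []
  | l :: ls => if isMetaAlt l.toList then dropMetaS ls else l :: ls

theorem splC_ne_nil (cs : List Char) : splC cs ≠ [] := by
  cases cs with
  | nil => simp [splC]
  | cons c rest =>
    simp only [splC]
    split_ifs
    · simp
    · cases h : splC rest with
      | nil => exact absurd h (splC_ne_nil rest)
      | cons a t => simp

-- PySem's fuel-based splitOn.go, on the singleton separator, computes splC
theorem splitOn_go_eq (l : List Char) : ∀ (fuel : Nat) (cur : List Char)
    (acc : List (List Char)), l.length < fuel →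
    PySem.Chars.splitOn.go ['\n'] fuel l cur acc
      = acc.reverse ++ (splC l).modifyHead (cur.reverse ++ ·) := by
  induction l with
  | nil =>
    intro fuel cur acc hf
    match fuel, hf with
    | fuel + 1, _ => rw [PySem.Chars.splitOn.go.eq_def]; simp [splC]
  | cons c rest ih =>
    intro fuel cur acc hf
    match fuel, hf with
    | fuel + 1, hf =>
      rw [PySem.Chars.splitOn.go.eq_def]
      simp only []
      by_cases hc : c = '\n'
      · subst hc
        rw [if_pos (by simp [List.isPrefixOf])]
        simp only [List.length_cons, List.length_nil, Nat.zero_add, List.drop_succ_cons,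
          List.drop_zero]
        rw [ih fuel [] (cur.reverse :: acc) (by simpa using hf)]
        simp [splC]
        cases h : splC rest with
        | nil => exact absurd h (splC_ne_nil rest)
        | cons a t => simp [List.modifyHead]
      · rw [if_neg (by simp [List.isPrefixOf]; exact fun h => hc h.symm)]
        rw [ih fuel (c :: cur) acc (by simpa using hf)]
        simp only [splC, if_neg hc, List.modifyHead_modifyHead]
        cases h : splC rest with
        | nil => exact absurd h (splC_ne_nil rest)
        | cons a t => simp [List.modifyHead, Function.comp]

theorem splitOn_eq_splC (cs : List Char) :
    PySem.Chars.splitOn cs ['\n'] = splC cs := by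
  unfold PySem.Chars.splitOn
  rw [splitOn_go_eq cs (cs.length + 1) [] [] (by omega)]
  cases h : splC cs with
  | nil => exact absurd h (splC_ne_nil cs)
  | cons a t => simp [List.modifyHead]

theorem splC_no_newline {cs : List Char} (h : '\n' ∉ cs) : splC cs = [cs] := by
  induction cs with
  | nil => rfl
  | cons c rest ih =>
    simp only [List.mem_cons, not_or] at h
    simp only [splC, if_neg (Ne.symm h.1), ih h.2]
    simp [List.modifyHead]

theorem splC_append {pre : List Char} (rest : List Char) (h : '\n' ∉ pre) :
    splC (pre ++ '\n' :: rest) = pre :: splC rest := by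
  induction pre with
  | nil => simp [splC]
  | cons c p ih =>
    simp only [List.mem_cons, not_or] at h
    simp only [List.cons_append, splC, if_neg (Ne.symm h.1), ih h.2, List.modifyHead_cons]

theorem join_cons (sep : List Char) (c : Char) (a : List Char)
    (t : List (List Char)) :
    PySem.Chars.join sep ((c :: a) :: t) = c :: PySem.Chars.join sep (a :: t) := by
  cases t with
  | nil => simp [PySem.Chars.join_singleton]
  | cons b r => simp [PySem.Chars.join_cons_cons]

theorem join_splC (cs : List Char) : PySem.Chars.join ['\n'] (splC cs) = cs := by
  induction cs with
  | nil => simp [splC, PySem.Chars.join_singleton]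
  | cons c rest ih =>
    by_cases hc : c = '\n'
    · subst hc
      have hs : splC ('\n' :: rest) = [] :: splC rest := by simp [splC]
      rw [hs]
      cases h : splC rest with
      | nil => exact absurd h (splC_ne_nil rest)
      | cons a t =>
        rw [h] at ih
        rw [PySem.Chars.join_cons_cons]
        simp [ih]
    · simp only [splC, if_neg hc]
      cases h : splC rest with
      | nil => exact absurd h (splC_ne_nil rest)
      | cons a t =>
        rw [h] at ih
        rw [List.modifyHead_cons, join_cons, ih]

-- where find points for the singleton separator: no '\n' before it, '\n' at it
theorem find_newline_decomp {cs : List Char} (h0 : 0 ≤ PySem.Chars.find cs ['\n']) :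
    (PySem.Chars.find cs ['\n']).toNat < cs.length ∧
    '\n' ∉ cs.take (PySem.Chars.find cs ['\n']).toNat ∧
    cs = cs.take (PySem.Chars.find cs ['\n']).toNat
        ++ '\n' :: cs.drop ((PySem.Chars.find cs ['\n']).toNat + 1) := by
  obtain ⟨hpre, hmin⟩ := PySem.Chars.find_spec h0
  set n := (PySem.Chars.find cs ['\n']).toNat with hn
  obtain ⟨t, ht⟩ := hpre
  have hdropne : cs.drop n ≠ [] := by
    intro e; rw [e] at ht; simp at ht
  have hnlt : n < cs.length := by
    by_contra hge
    exact hdropne (List.drop_eq_nil_iff.mpr (by omega))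
  have hdrop : cs.drop n = cs[n] :: cs.drop (n + 1) := List.drop_eq_getElem_cons hnlt
  have hat : cs[n] = '\n' := by
    rw [hdrop] at ht
    simp only [List.singleton_append, List.cons.injEq] at ht
    exact ht.1.symm
  refine ⟨hnlt, ?_, ?_⟩
  · intro hmem
    obtain ⟨j, hj, hjv⟩ := List.getElem_of_mem hmem
    have hjlt : j < n := by
      have := hj; simp [List.length_take] at this; omega
    have hjlen : j < cs.length := by omega
    have : (['\n'] : List Char) <+: cs.drop j := by
      rw [List.drop_eq_getElem_cons hjlen]
      have : cs[j] = '\n' := by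
        rw [List.getElem_take] at hjv
        exact hjv
      rw [this]
      exact ⟨cs.drop (j + 1), rfl⟩
    exact hmin j hjlt this
  · conv_lhs => rw [← List.take_append_drop n cs]
    rw [hdrop, hat]

-- the while-loop of B computes exactly: drop leading metadata lines, rejoin, strip
theorem stripLoop_eq (cs : List Char) :
    stripLoop cs = PySem.Chars.strip (PySem.Chars.join ['\n'] (dropMetaC (splC cs))) := by
  suffices H : ∀ (N : Nat) (cs : List Char), cs.length ≤ N →
      stripLoop cs = PySem.Chars.strip (PySem.Chars.join ['\n'] (dropMetaC (splC cs))) from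
    H cs.length cs le_rfl
  intro N
  induction N with
  | zero =>
    intro cs hlen
    have hcs : cs = [] := by cases cs with | nil => rfl | cons a t => simp at hlen
    subst hcs
    rw [stripLoop]
    decide
  | succ N ih =>
    intro cs hlen
    rw [stripLoop]
    by_cases hneg : PySem.Chars.find cs ['\n'] < 0
    · rw [dif_pos hneg]
      have hnotin : '\n' ∉ cs := by
        have he : PySem.Chars.find cs ['\n'] = -1 := by
          have := PySem.Chars.neg_one_le_find cs ['\n']; omega
        have := (PySem.Chars.find_eq_neg_one_iff cs ['\n']).mp he
        simpa [List.singleton_infix_iff] using this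
      rw [splC_no_newline hnotin]
      simp only [dropMetaC]
      split_ifs with hm
      · simp only [PySem.Chars.join_nil]
        decide
      · rw [PySem.Chars.join_singleton]
    · rw [dif_neg hneg]
      have h0 : 0 ≤ PySem.Chars.find cs ['\n'] := by omega
      obtain ⟨hnlt, hpre, hdec⟩ := find_newline_decomp h0
      set n := (PySem.Chars.find cs ['\n']).toNat with hn
      have hslice1 : PySem.Chars.slice cs none (some (PySem.Chars.find cs ['\n'])) = cs.take n := by
        simp only [PySem.Chars.slice_eq_listSlice]
        rw [PySem.List.slice_to cs h0]
      have hslice2 : PySem.Chars.slice cs (some (PySem.Chars.find cs ['\n'] + 1)) none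
          = cs.drop (n + 1) := by
        simp only [PySem.Chars.slice_eq_listSlice]
        rw [PySem.List.slice_from cs (by omega)]
        congr 1
        omega
      have hsplit : splC cs = cs.take n :: splC (cs.drop (n + 1)) := by
        conv_lhs => rw [hdec]
        exact splC_append _ hpre
      rw [hslice1, hsplit]
      simp only [dropMetaC]
      by_cases hm : isMetaAlt (cs.take n) = true
      · rw [if_neg (by simp [hm]), if_pos hm, hslice2,
          ih (cs.drop (n + 1)) (by simp only [List.length_drop]; omega)]
      · rw [if_pos (by simp [hm]), if_neg hm, ← hsplit, join_splC]

-- ===== A-side lemmas (the skip-flag fold collapses to dropMetaS) =====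

theorem metaCond_eq (ln : String) :
    (PySem.Str.startswith (PySem.Str.strip ln) "You tagged" || PySem.Str.startswith (PySem.Str.strip ln) "You were"
      || PySem.Str.startswith (PySem.Str.strip ln) "Updated " || PySem.Str.startswith (PySem.Str.strip ln) "Click for"
      || PySem.Str.startswith (PySem.Str.strip ln) "http" || PySem.Str.startswith (PySem.Str.strip ln) "Place:"
      || PySem.Str.startswith (PySem.Str.strip ln) "Address:" || PySem.Str.startswith (PySem.Str.strip ln) "From "
      || (PySem.Str.len (PySem.Str.strip ln) == 0)) = isMetaAlt ln.toList := by
  have hz : ∀ l : List Char, ((l.length : Int) == 0) = l.isEmpty := by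
    intro l; cases l with
    | nil => simp
    | cons a t => simp; omega
  simp [isMetaAlt, PySem.Str.startswith_eq, PySem.Str.toList_strip, PySem.Str.len_eq, hz]

theorem foldl_stripAStep_false (lines : List String) (out : List String) :
    lines.foldl stripAStep (false, out) = (false, out ++ lines) := by
  induction lines generalizing out with
  | nil => simp
  | cons l ls ih => simp [stripAStep, ih]

theorem stripAStep_true_eq (out : List String) (ln : String) :
    stripAStep (true, out) ln = if isMetaAlt ln.toList then (true, out) else (false, out ++ [ln]) := by
  rw [← metaCond_eq]
  rfl

theorem foldl_stripAStep_true (lines : List String) :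
    (lines.foldl stripAStep (true, [])).2 = dropMetaS lines := by
  induction lines with
  | nil => rfl
  | cons l ls ih =>
    by_cases h : isMetaAlt l.toList
    · simp only [List.foldl_cons, stripAStep_true_eq, h, if_pos, ih, dropMetaS]
    · simp only [List.foldl_cons, stripAStep_true_eq, h, if_neg, Bool.false_eq_true,
        not_false_eq_true, foldl_stripAStep_false, dropMetaS, List.nil_append,
        List.singleton_append]

theorem dropMetaS_map (L : List (List Char)) :
    (dropMetaS (L.map String.ofList)).map String.toList = dropMetaC L := by
  induction L with
  | nil => rfl
  | cons l ls ih =>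
    simp only [List.map_cons, dropMetaS, dropMetaC, String.toList_ofList]
    split_ifs with h
    · exact ih
    · simp [Function.comp_def, String.toList_ofList]

-- ===== VERDICT (by name: the statement is the Claim_ definition above) =====
theorem strip_md_spec : Claim_equal_strip_md := by
  intro t _
  unfold Spec_strip_md
  apply String.toList_inj.mp
  have hlines : (PySem.Str.split? t "\n").getD [] = (splC t.toList).map String.ofList := by
    simp [PySem.Str.split?, PySem.Chars.split?, splitOn_eq_splC]
  simp only [strip_md, strip_md_alt, hlines, foldl_stripAStep_true,
    PySem.Str.toList_strip, PySem.Str.toList_join, dropMetaS_map, String.toList_ofList,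
    stripLoop_eq]
  rfl
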